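-- pv_equiv track=rewrite | github.com/vachannd/howaver | src/between_two_sets.py | get_inbetween_factor_count_brute_force
-- ===== SOURCE A (Python) =====
-- import typing
--
-- def inbetween_number_gen(lower_bound: int, upper_bound: int):
--     for x in range(lower_bound, upper_bound + 1):
--         yield x
--
-- def get_inbetween_factor_count_brute_force(a: typing.List[int], b: typing.List[int]):
--     """
--     Calculates the number of inbetween factors present between to sets. See <b>between_two_sets<b>
--     problem in problems folder of the repository for the explanation.
--     This is a Brute Force solution.
--     :param a: List of integers
--     :param b: List of integers
--     :return: Count of inbetween factors.
--     """
--     inbetween_factors = []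
--     for x in inbetween_number_gen(a[-1], b[0]):
--         for array_one_ele in a:
--             if x % array_one_ele:
--                 break
--         else:
--             for array_two_ele in b:
--                 if array_two_ele % x:
--                     break
--             else:
--                 inbetween_factors.append(x)
--     return len(inbetween_factors)
-- ===== SOURCE B (Python) =====
-- def _divides(d, n):
--     """True iff d divides n (total: 0 divides only 0)."""
--     return n == 0 if d == 0 else n % d == 0
--
--
-- def get_inbetween_factor_count_brute_force(a, b):
--     """Count x in [a[-1], b[0]] that every element of a divides and that divide
--     every element of b: reduce a to its lcm and b to its gcd once, then a single
--     pass over the range with two divisibility tests (no inner scans)."""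
--     lo, hi = a[-1], b[0]
--     L = 1
--     for x in a:
--         if x < 0:
--             x = -x
--         t, u = L, x
--         while u:
--             t, u = u, t % u
--         L = L * x // t if t else 0
--     g = 0
--     for y in b:
--         if y < 0:
--             y = -y
--         t, u = g, y
--         while u:
--             t, u = u, t % u
--         g = t
--     count = 0
--     for x in range(lo, hi + 1):
--         if _divides(L, x) and _divides(x, g):
--             count += 1
--     return count
-- ===== Notes on version B (the rewrite author's own statement) =====
-- stated objective: alternative
-- what changed: B precomputes lcm(|a|) and gcd(b) once (hand-rolled Euclid) and makes a single pass over the range with two total divisibility tests, instead of A's inner scan of both lists for every x in the range.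
-- outside the precondition, e.g. on get_inbetween_factor_count_brute_force([-10, 0, -3, 7], [9, 1]): A returns 0, B returns 0
import Mathlib
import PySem

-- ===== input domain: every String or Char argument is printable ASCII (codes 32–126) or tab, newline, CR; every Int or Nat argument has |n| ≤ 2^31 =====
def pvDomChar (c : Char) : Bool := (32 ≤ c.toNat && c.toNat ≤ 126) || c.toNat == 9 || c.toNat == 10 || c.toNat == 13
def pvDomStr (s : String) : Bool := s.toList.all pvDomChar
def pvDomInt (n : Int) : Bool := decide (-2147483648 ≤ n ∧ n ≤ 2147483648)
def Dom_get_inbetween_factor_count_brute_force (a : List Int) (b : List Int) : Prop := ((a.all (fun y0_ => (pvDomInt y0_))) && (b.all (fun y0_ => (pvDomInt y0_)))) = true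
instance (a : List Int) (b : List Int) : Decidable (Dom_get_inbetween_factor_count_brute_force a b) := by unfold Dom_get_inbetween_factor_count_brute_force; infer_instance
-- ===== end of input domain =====

-- B replaces A's nested per-x scans of a and b by a one-time lcm(|a|)/gcd(b) reduction
-- followed by a single pass over the range with two total divisibility tests (objective: alternative).

-- ===== PORT A =====
-- inner loop `for e in a: if x % e: break` / `else:` — true iff no break
def pvScanA (x : Int) : List Int → Bool
  | [] => true
  | e :: rest => if PySem.Int.mod x e ≠ 0 then false else pvScanA x rest

-- inner loop `for f in b: if f % x: break` / `else:` — true iff no break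
def pvScanB (x : Int) : List Int → Bool
  | [] => true
  | f :: rest => if PySem.Int.mod f x ≠ 0 then false else pvScanB x rest

def get_inbetween_factor_count_brute_force (a : List Int) (b : List Int) : Int :=
  match PySem.List.pyGet? a (-1), PySem.List.pyGet? b 0 with
  | some lo, some hi =>
    -- `for x in inbetween_number_gen(a[-1], b[0])` = range(lo, hi+1)
    (((PySem.List.pyRange lo (hi + 1) 1).foldl
      (fun acc x =>
        if pvScanA x a then
          if pvScanB x b then acc ++ [x] else acc
        else acc) []).length : Int)
  | _, _ => 0  -- a[-1] / b[0] raises IndexError (outside Pre_)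

-- ===== PORT B =====
-- `t, u = t0, u0; while u: t, u = u, t % u; return t` — exact for Python whenever
-- u0 ≥ 0 (B only calls it on absolute values); the u < 0 case never arises in B.
def pvEuclid (t u : Int) : Int :=
  if u ≤ 0 then t else pvEuclid u (PySem.Int.mod t u)
termination_by u.toNat
decreasing_by
  have := PySem.Int.mod_nonneg t (b := u) (by omega)
  have := PySem.Int.mod_lt t (b := u) (by omega)
  omega

-- Source B's `_divides(d, n)`: total divisibility test (0 divides only 0)
def pvDivides (d n : Int) : Bool :=
  if d == 0 then n == 0 else PySem.Int.mod n d == 0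

def get_inbetween_factor_count_brute_force_alt (a : List Int) (b : List Int) : Int :=
  match PySem.List.pyGet? a (-1) with
  | none => 0  -- a[-1] raises IndexError (outside Pre_)
  | some lo =>
    match PySem.List.pyGet? b 0 with
    | none => 0  -- b[0] raises IndexError (outside Pre_)
    | some hi =>
    let L := a.foldl (fun L x0 =>
      let x := if x0 < 0 then -x0 else x0
      let t := pvEuclid L x
      if t ≠ 0 then PySem.Int.floordiv (L * x) t else 0) 1
    let g := b.foldl (fun g y0 =>
      let y := if y0 < 0 then -y0 else y0
      pvEuclid g y) 0
    (PySem.List.pyRange lo (hi + 1) 1).foldl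
      (fun c x => if pvDivides L x && pvDivides x g then c + 1 else c) 0

-- ===== PRECONDITION & SPEC =====
-- Pre_ excludes (i) empty a or b, on which A raises IndexError, and (ii) inputs with a
-- nonempty range [a[-1], b[0]] that contains 0 or with 0 ∈ a, on which A usually raises
-- ZeroDivisionError (at `f % 0` or `x % 0`); whether A raises on the 0 ∈ a part depends
-- on divisibility across the whole range, which is not a closed-form shape, so the whole
-- part is excluded — on the excluded inputs where A does return, it returns 0 and B
-- returns 0 as well.
def Pre_get_inbetween_factor_count_brute_force (a : List Int) (b : List Int) : Prop :=
  a ≠ [] ∧ b ≠ [] ∧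
    (b.head! < a.getLast! ∨ ((0 : Int) ∉ a ∧ (0 < a.getLast! ∨ b.head! < 0)))
instance (a : List Int) (b : List Int) : Decidable (Pre_get_inbetween_factor_count_brute_force a b) := by
  unfold Pre_get_inbetween_factor_count_brute_force; infer_instance

def pvWitness_get_inbetween_factor_count_brute_force : List Int × List Int := ([2], [8])

def Spec_get_inbetween_factor_count_brute_force (a : List Int) (b : List Int) (out : Int) : Prop := out = get_inbetween_factor_count_brute_force_alt a b
instance (a : List Int) (b : List Int) (out : Int) : Decidable (Spec_get_inbetween_factor_count_brute_force a b out) := by unfold Spec_get_inbetween_factor_count_brute_force; infer_instance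

-- ===== CLAIM (what is proved, stated in full; the proofs are below) =====
def Claim_equal_get_inbetween_factor_count_brute_force : Prop := ∀ (a : List Int) (b : List Int), Dom_get_inbetween_factor_count_brute_force a b → Pre_get_inbetween_factor_count_brute_force a b → Spec_get_inbetween_factor_count_brute_force a b (get_inbetween_factor_count_brute_force a b)

-- ===== LEMMAS AND PROOFS =====

-- `if x0 < 0 then -x0 else x0` is |x0|
theorem pvAbs_eq (x0 : Int) : (if x0 < 0 then -x0 else x0) = (x0.natAbs : Int) := by
  split <;> omega

-- the hand-rolled Euclid loop computes Nat.gcd on nonnegative inputs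
theorem pvEuclid_natCast (n m : Nat) : pvEuclid (m : Int) (n : Int) = (Nat.gcd m n : Int) := by
  induction n using Nat.strong_induction_on generalizing m with
  | _ n ih =>
    rcases Nat.eq_zero_or_pos n with hn | hn
    · subst hn; rw [pvEuclid]; simp
    · rw [pvEuclid]
      have hns : ¬ ((n : Int) ≤ 0) := by omega
      rw [if_neg hns, PySem.Int.mod_natCast, ih (m % n) (Nat.mod_lt _ hn) n]
      rw [Nat.gcd_comm n (m % n), ← Nat.gcd_rec, Nat.gcd_comm]

-- the lcm accumulator of B equals the Nat-level lcm fold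
theorem pvLcmFold_eq (a : List Int) (acc : Nat) :
    a.foldl (fun L x0 =>
      let x := if x0 < 0 then -x0 else x0
      let t := pvEuclid L x
      if t ≠ 0 then PySem.Int.floordiv (L * x) t else 0) (acc : Int)
      = ((a.foldl (fun n e => Nat.lcm n e.natAbs) acc : Nat) : Int) := by
  induction a generalizing acc with
  | nil => rfl
  | cons e rest ih =>
    rw [List.foldl_cons, List.foldl_cons]
    have hstep : (let x := if e < 0 then -e else e
        let t := pvEuclid (acc : Int) x
        if t ≠ 0 then PySem.Int.floordiv ((acc : Int) * x) t else 0)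
          = ((Nat.lcm acc e.natAbs : Nat) : Int) := by
      simp only [pvAbs_eq, pvEuclid_natCast]
      rcases Nat.eq_zero_or_pos (Nat.gcd acc e.natAbs) with hg | hg
      · obtain ⟨h1, h2⟩ := Nat.gcd_eq_zero_iff.mp hg
        rw [hg, h1, h2]
        simp [Nat.lcm]
      · have hne : ((Nat.gcd acc e.natAbs : Nat) : Int) ≠ 0 := by exact_mod_cast hg.ne'
        rw [if_pos hne,
            show ((acc : Int) * ((e.natAbs : Nat) : Int)) = ((acc * e.natAbs : Nat) : Int) by
              push_cast; ring,
            PySem.Int.floordiv_natCast]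
        norm_cast
    rw [hstep, ih]

-- the gcd accumulator of B equals the Nat-level gcd fold
theorem pvGcdFold_eq (b : List Int) (acc : Nat) :
    b.foldl (fun g y0 =>
      let y := if y0 < 0 then -y0 else y0
      pvEuclid g y) (acc : Int)
      = ((b.foldl (fun n e => Nat.gcd n e.natAbs) acc : Nat) : Int) := by
  induction b generalizing acc with
  | nil => rfl
  | cons e rest ih =>
    rw [List.foldl_cons, List.foldl_cons]
    have hstep : (let y := if e < 0 then -e else e
        pvEuclid (acc : Int) y) = ((Nat.gcd acc e.natAbs : Nat) : Int) := by
      simp only [pvAbs_eq, pvEuclid_natCast]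
    rw [hstep, ih]

-- the folded lcm divides m iff the accumulator and every |e| do
theorem pvLcmFold_dvd_iff (a : List Int) (acc m : Nat) :
    (a.foldl (fun n e => Nat.lcm n e.natAbs) acc) ∣ m ↔ acc ∣ m ∧ ∀ e ∈ a, e.natAbs ∣ m := by
  induction a generalizing acc with
  | nil => simp
  | cons e rest ih =>
    simp only [List.foldl_cons, ih, Nat.lcm_dvd_iff, List.mem_cons]
    constructor
    · rintro ⟨⟨h1, h2⟩, h3⟩
      exact ⟨h1, fun f hf => hf.elim (fun h => h ▸ h2) (h3 f)⟩
    · rintro ⟨h1, h2⟩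
      exact ⟨⟨h1, h2 e (Or.inl rfl)⟩, fun f hf => h2 f (Or.inr hf)⟩

-- k divides the folded gcd iff it divides the accumulator and every |e|
theorem pvGcdFold_dvd_iff (b : List Int) (acc k : Nat) :
    k ∣ (b.foldl (fun n e => Nat.gcd n e.natAbs) acc) ↔ k ∣ acc ∧ ∀ e ∈ b, k ∣ e.natAbs := by
  induction b generalizing acc with
  | nil => simp
  | cons e rest ih =>
    simp only [List.foldl_cons, ih, Nat.dvd_gcd_iff, List.mem_cons]
    constructor
    · rintro ⟨⟨h1, h2⟩, h3⟩
      exact ⟨h1, fun f hf => hf.elim (fun h => h ▸ h2) (h3 f)⟩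
    · rintro ⟨h1, h2⟩
      exact ⟨⟨h1, h2 e (Or.inl rfl)⟩, fun f hf => h2 f (Or.inr hf)⟩

-- Source B's total `_divides` is exactly Int divisibility
theorem pvDivides_iff (d n : Int) : pvDivides d n = true ↔ d ∣ n := by
  unfold pvDivides
  by_cases hd : d = 0
  · subst hd
    simp only [beq_self_eq_true, if_true, beq_iff_eq, Int.zero_dvd]
  · have hbe : (d == 0) = false := by simpa using hd
    simp only [hbe, Bool.false_eq_true, if_false, beq_iff_eq,
      PySem.Int.mod_eq_zero_iff_dvd]

-- A's first inner loop succeeds iff every element of a divides x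
theorem pvScanA_iff (x : Int) (a : List Int) : pvScanA x a = true ↔ ∀ e ∈ a, e ∣ x := by
  induction a with
  | nil => simp [pvScanA]
  | cons e rest ih =>
    simp [pvScanA, ih, PySem.Int.mod_eq_zero_iff_dvd]

-- A's second inner loop succeeds iff x divides every element of b
theorem pvScanB_iff (x : Int) (b : List Int) : pvScanB x b = true ↔ ∀ f ∈ b, x ∣ f := by
  induction b with
  | nil => simp [pvScanB]
  | cons f rest ih =>
    simp [pvScanB, ih, PySem.Int.mod_eq_zero_iff_dvd]

-- ===== VERDICT (by name: the statement is the Claim_ definition above) =====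
theorem get_inbetween_factor_count_brute_force_spec : Claim_equal_get_inbetween_factor_count_brute_force := by
  intro a b _ hpre
  obtain ⟨ha, hb, -⟩ := hpre
  unfold Spec_get_inbetween_factor_count_brute_force
  unfold get_inbetween_factor_count_brute_force get_inbetween_factor_count_brute_force_alt
  obtain ⟨lo, hlo⟩ : ∃ lo, PySem.List.pyGet? a (-1) = some lo := by
    rw [PySem.List.pyGet?_neg_one]
    exact ⟨a.getLast ha, List.getLast?_eq_some_getLast ha⟩
  obtain ⟨hi, hhi⟩ : ∃ hi, PySem.List.pyGet? b 0 = some hi := by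
    rw [PySem.List.pyGet?_zero]
    cases b with
    | nil => exact absurd rfl hb
    | cons y ys => exact ⟨y, rfl⟩
  rw [hlo, hhi]
  simp only []
  -- name the folded lcm and gcd
  have hLv : a.foldl (fun L x0 =>
      let x := if x0 < 0 then -x0 else x0
      let t := pvEuclid L x
      if t ≠ 0 then PySem.Int.floordiv (L * x) t else 0) (1 : Int)
      = ((a.foldl (fun n e => Nat.lcm n e.natAbs) 1 : Nat) : Int) := by
    simpa using pvLcmFold_eq a 1
  have hGv : b.foldl (fun g y0 =>
      let y := if y0 < 0 then -y0 else y0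
      pvEuclid g y) (0 : Int)
      = ((b.foldl (fun n e => Nat.gcd n e.natAbs) 0 : Nat) : Int) := by
    simpa using pvGcdFold_eq b 0
  rw [hLv, hGv]
  set L : Nat := a.foldl (fun n e => Nat.lcm n e.natAbs) 1
  set G : Nat := b.foldl (fun n e => Nat.gcd n e.natAbs) 0
  -- A's fold builds a filtered list; B's fold counts
  have hfunA : (fun (acc : List Int) x =>
      if pvScanA x a then if pvScanB x b then acc ++ [x] else acc else acc)
      = (fun (acc : List Int) x => if (pvScanA x a && pvScanB x b) then acc ++ [x] else acc) := by
    funext acc x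
    by_cases h1 : pvScanA x a = true <;> by_cases h2 : pvScanB x b = true <;>
      simp [h1, h2]
  rw [hfunA, PySem.List.foldl_append_if_eq_filter, PySem.List.foldl_count_if,
      List.nil_append, ← List.countP_eq_length_filter]
  rw [zero_add]
  congr 1
  apply List.countP_congr
  intro x _
  -- pointwise: the brute-force test equals the lcm/gcd test
  have hiff : (pvScanA x a && pvScanB x b) = true ↔
      (pvDivides (L : Int) x && pvDivides x (G : Int)) = true := by
    simp only [Bool.and_eq_true, pvScanA_iff, pvScanB_iff, pvDivides_iff]
    constructor
    · rintro ⟨h1, h2⟩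
      constructor
      · rw [← Int.natAbs_dvd_natAbs]
        simp only [Int.natAbs_natCast]
        exact (pvLcmFold_dvd_iff a 1 x.natAbs).mpr
          ⟨Nat.one_dvd _, fun e he => Int.natAbs_dvd_natAbs.mpr (h1 e he)⟩
      · rw [← Int.natAbs_dvd_natAbs]
        simp only [Int.natAbs_natCast]
        exact (pvGcdFold_dvd_iff b 0 x.natAbs).mpr
          ⟨Nat.dvd_zero _, fun e he => Int.natAbs_dvd_natAbs.mpr (h2 e he)⟩
    · rintro ⟨h1, h2⟩
      rw [← Int.natAbs_dvd_natAbs] at h1 h2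
      simp only [Int.natAbs_natCast] at h1 h2
      constructor
      · intro e he
        exact Int.natAbs_dvd_natAbs.mp (Nat.dvd_trans (((pvLcmFold_dvd_iff a 1 L).mp dvd_rfl).2 e he) h1)
      · intro f hf
        exact Int.natAbs_dvd_natAbs.mp (Nat.dvd_trans h2 (((pvGcdFold_dvd_iff b 0 G).mp dvd_rfl).2 f hf))
  exact hiff
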